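-- pv_equiv track=rewrite | github.com/Blues-berry/SF3D_learn | sf3d/material_refine/training/preview.py | prior_variant_distribution
-- ===== SOURCE A (Python) =====
-- from collections import Counter, defaultdict
-- from typing import Any
--
-- PRIOR_VARIANT_DISPLAY_ORDER = [
--     "large_gap_prior",
--     "medium_gap_prior",
--     "mild_gap_prior",
--     "near_gt_prior",
--     "no_prior_bootstrap",
-- ]
--
-- def prior_variant_distribution(items: list[dict[str, Any]]) -> dict[str, int]:
--     counts = Counter(str(item.get("prior_variant_type") or "unknown") for item in items)
--     ordered: dict[str, int] = {}
--     for variant in PRIOR_VARIANT_DISPLAY_ORDER: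
--         if counts.get(variant):
--             ordered[variant] = int(counts[variant])
--     for variant in sorted(counts):
--         if variant not in ordered:
--             ordered[variant] = int(counts[variant])
--     return ordered
-- ===== SOURCE B (Python) =====
-- from collections import Counter
--
-- PRIOR_VARIANT_DISPLAY_ORDER = [
--     "large_gap_prior",
--     "medium_gap_prior",
--     "mild_gap_prior",
--     "near_gt_prior",
--     "no_prior_bootstrap",
-- ]
--
-- def prior_variant_distribution(items):
--     counts = Counter(str(item.get("prior_variant_type") or "unknown") for item in items)
--     rank = {v: i for i, v in enumerate(PRIOR_VARIANT_DISPLAY_ORDER)}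
--     n = len(PRIOR_VARIANT_DISPLAY_ORDER)
--     ordered_keys = sorted(counts, key=lambda v: (rank.get(v, n), v))
--     return {v: int(counts[v]) for v in ordered_keys}
-- ===== Notes on version B (the rewrite author's own statement) =====
-- stated objective: simpler
-- what changed: A's two-phase ordering (loop the fixed display list inserting present variants, then a second loop over the sorted keys skipping ones already placed) is replaced by a single keyed sort of the counter's distinct keys under a composite key (display-rank, name), so display variants come first in list order and all other variants follow alphabetically.
import Mathlib
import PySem

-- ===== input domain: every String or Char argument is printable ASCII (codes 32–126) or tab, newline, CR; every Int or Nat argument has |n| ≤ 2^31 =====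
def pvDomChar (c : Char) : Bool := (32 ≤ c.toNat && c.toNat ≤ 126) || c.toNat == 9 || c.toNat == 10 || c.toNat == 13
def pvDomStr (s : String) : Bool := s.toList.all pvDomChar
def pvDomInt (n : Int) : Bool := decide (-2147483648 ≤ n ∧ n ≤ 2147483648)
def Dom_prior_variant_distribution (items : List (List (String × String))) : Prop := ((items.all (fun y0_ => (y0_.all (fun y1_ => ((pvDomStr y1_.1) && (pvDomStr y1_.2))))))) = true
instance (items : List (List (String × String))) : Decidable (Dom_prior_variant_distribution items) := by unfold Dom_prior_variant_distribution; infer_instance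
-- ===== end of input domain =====

-- B replaces A's two-phase ordering (display-list loop, then sorted leftovers) with ONE keyed
-- sort of the counter's distinct keys under a composite (display-rank, name) key; same result,
-- objective: simpler (one ordering pass instead of two).

-- ===== PORT A =====
def pvDisplayOrder : List String :=
  ["large_gap_prior", "medium_gap_prior", "mild_gap_prior", "near_gt_prior", "no_prior_bootstrap"]

-- str(item.get("prior_variant_type") or "unknown"): missing key or empty (falsy) value -> "unknown"
def pvKey (item : List (String × String)) : String :=
  match item.find? (fun p => p.1 == "prior_variant_type") with
  | none => "unknown"
  | some p => if p.2 == "" then "unknown" else p.2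

def prior_variant_distribution (items : List (List (String × String))) : List (String × Int) :=
  let counts := PySem.Dict.counter (items.map pvKey)
  let ordered1 := pvDisplayOrder.foldl
    (fun d variant => if counts.getD variant 0 != 0 then d.insert variant (counts.getD variant 0) else d)
    PySem.Dict.empty
  let ordered2 := (PySem.List.sorted counts.keys id).foldl
    (fun d variant => if d.contains variant then d else d.insert variant (counts.getD variant 0))
    ordered1
  ordered2.items

-- ===== PORT B =====
-- rank = {v: i for i, v in enumerate(PRIOR_VARIANT_DISPLAY_ORDER)}
def pvRank : PySem.Dict String Int :=
  (pvDisplayOrder.zipIdx).foldl (fun d p => d.insert p.1 (p.2 : Int)) PySem.Dict.empty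

-- lambda v: (rank.get(v, n), v)   with n = len(PRIOR_VARIANT_DISPLAY_ORDER)
def pvSortKey (v : String) : Lex (Int × String) :=
  toLex (pvRank.getD v (pvDisplayOrder.length : Int), v)

def prior_variant_distribution_alt (items : List (List (String × String))) : List (String × Int) :=
  let counts := PySem.Dict.counter (items.map pvKey)
  let ordered_keys := PySem.List.sorted counts.keys pvSortKey
  (ordered_keys.foldl (fun d v => d.insert v (counts.getD v 0)) PySem.Dict.empty).items

-- ===== PRECONDITION & SPEC =====
def Spec_prior_variant_distribution (items : List (List (String × String))) (out : List (String × Int)) : Prop := out = prior_variant_distribution_alt items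
instance (items : List (List (String × String))) (out : List (String × Int)) : Decidable (Spec_prior_variant_distribution items out) := by unfold Spec_prior_variant_distribution; infer_instance

-- ===== CLAIM (what is proved, stated in full; the proofs are below) =====
def Claim_equal_prior_variant_distribution : Prop := ∀ (items : List (List (String × String))), Dom_prior_variant_distribution items → Spec_prior_variant_distribution items (prior_variant_distribution items)

-- ===== LEMMAS AND PROOFS =====

theorem pvDisplayOrder_nodup : pvDisplayOrder.Nodup := by decide

-- the five display variants are ranked 0..4 < 5, and sort strictly increasing under pvSortKey
theorem pvSortKey_pairwise_display : List.Pairwise (fun a b => pvSortKey a < pvSortKey b) pvDisplayOrder := by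
  decide

theorem pvRank_getD_of_mem : ∀ v ∈ pvDisplayOrder, pvRank.getD v 5 < 5 := by decide

theorem pvRank_getD_of_not_mem (v : String) (h : v ∉ pvDisplayOrder) : pvRank.getD v 5 = 5 := by
  simp [pvDisplayOrder] at h
  obtain ⟨h1, h2, h3, h4, h5⟩ := h
  simp [pvRank, pvDisplayOrder, List.zipIdx_cons, PySem.Dict.getD_insert, PySem.Dict.getD_empty,
    h1, h2, h3, h4, h5]

theorem pvSortKey_eq (v : String) : pvSortKey v = toLex (pvRank.getD v 5, v) := by
  simp [pvSortKey, pvDisplayOrder]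

-- a fold of unconditional inserts tests membership like the list it inserted
theorem foldl_insert_contains (g : String → Int) (l : List String) (d : PySem.Dict String Int)
    (v : String) :
    (l.foldl (fun d x => d.insert x (g x)) d).contains v = (l.contains v || d.contains v) := by
  induction l generalizing d with
  | nil => simp
  | cons a l ih =>
    simp only [List.foldl_cons, ih, PySem.Dict.contains_insert, List.contains_cons]
    cases h : v == a <;> simp

-- A's second loop: contains-guarded inserts over a Nodup list append exactly the fresh keys
theorem loop2_items (g : String → Int) :
    ∀ (l : List String) (d : PySem.Dict String Int), l.Nodup →
      (l.foldl (fun d v => if d.contains v then d else d.insert v (g v)) d).items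
        = d.items ++ (l.filter (fun v => !d.contains v)).map (fun v => (v, g v)) := by
  intro l
  induction l with
  | nil => intro d _; simp
  | cons a l ih =>
    intro d hn
    obtain ⟨ha, hl⟩ := List.nodup_cons.mp hn
    by_cases h : d.contains a = true
    · rw [List.foldl_cons, if_pos h, ih d hl]
      simp [h]
    · have h' : d.contains a = false := by simpa using h
      rw [List.foldl_cons, if_neg h]
      rw [ih (d.insert a (g a)) hl, PySem.Dict.items_insert_of_not_contains d (g a) h']
      have hcong : l.filter (fun v => !(d.insert a (g a)).contains v)
          = l.filter (fun v => !d.contains v) := by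
        refine List.filter_congr (fun v hv => ?_)
        have hne : v ≠ a := fun e => ha (e ▸ hv)
        simp [PySem.Dict.contains_insert, hne]
      simp [h', hcong]

theorem pv_main_eq (items : List (List (String × String))) :
    prior_variant_distribution items = prior_variant_distribution_alt items := by
  unfold prior_variant_distribution prior_variant_distribution_alt
  simp only []
  set xs := items.map pvKey with hxs
  set counts := PySem.Dict.counter xs with hcounts
  set f : String → String × Int := fun v => (v, counts.getD v 0) with hf
  set F1 := pvDisplayOrder.filter (fun v => counts.getD v 0 != 0) with hF1
  have hKnd : counts.keys.Nodup := PySem.Dict.nodup_keys_counter xs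
  have hmemK : ∀ v : String, v ∈ counts.keys ↔ v ∈ xs := by
    intro v
    rw [hcounts, PySem.Dict.keys_counter]
    exact PySem.Set.mem_ofList xs v
  have hget : ∀ v : String, counts.getD v 0 = (xs.count v : Int) := fun v => by
    rw [hcounts]; exact PySem.Dict.getD_counter xs v
  have hcond : ∀ v : String, (counts.getD v 0 != 0) = true ↔ v ∈ counts.keys := by
    intro v
    rw [hget, hmemK]
    simp [← List.count_pos_iff, Nat.pos_iff_ne_zero]
  -- A's first loop builds F1's association pairs
  have hord1 : pvDisplayOrder.foldl
      (fun d variant => if counts.getD variant 0 != 0 then d.insert variant (counts.getD variant 0) else d)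
      PySem.Dict.empty = F1.foldl (fun d v => d.insert v (counts.getD v 0)) PySem.Dict.empty := by
    rw [hF1]
    exact (List.foldl_filter (p := fun v => counts.getD v 0 != 0)
      (f := fun (d : PySem.Dict String Int) (v : String) => d.insert v (counts.getD v 0))
      (l := pvDisplayOrder) (init := PySem.Dict.empty)).symm
  rw [hord1]
  set d1 := F1.foldl (fun d v => d.insert v (counts.getD v 0)) PySem.Dict.empty with hd1
  have hF1nd : F1.Nodup := pvDisplayOrder_nodup.filter _
  have hd1items : d1.items = F1.map f := by
    have h := PySem.Dict.items_foldl_insert_fresh F1 id (fun v => counts.getD v 0)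
      PySem.Dict.empty (fun a _ => PySem.Dict.contains_empty a) (by simpa using hF1nd)
    simpa [hf] using h
  have hd1contains : ∀ v, d1.contains v = F1.contains v := by
    intro v
    rw [hd1, foldl_insert_contains]
    simp [PySem.Dict.contains_empty]
  have hF1mem : ∀ v, v ∈ F1 ↔ v ∈ pvDisplayOrder ∧ v ∈ counts.keys := by
    intro v
    rw [hF1, List.mem_filter]
    exact and_congr_right fun _ => hcond v
  -- A's second loop appends the sorted non-display keys
  have hsortnd : (PySem.List.sorted counts.keys id).Nodup :=
    ((PySem.List.sorted_perm counts.keys id false).nodup_iff).mpr hKnd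
  rw [loop2_items (fun v => counts.getD v 0) (PySem.List.sorted counts.keys id) d1 hsortnd]
  set T := (PySem.List.sorted counts.keys id).filter (fun v => !d1.contains v) with hT
  have hTmem : ∀ v, v ∈ T ↔ v ∈ counts.keys ∧ v ∉ pvDisplayOrder := by
    intro v
    rw [hT, List.mem_filter, (PySem.List.sorted_perm counts.keys id false).mem_iff]
    constructor
    · rintro ⟨hk, hc⟩
      refine ⟨hk, fun hd => ?_⟩
      have hvF1 : v ∈ F1 := (hF1mem v).mpr ⟨hd, hk⟩
      rw [hd1contains v] at hc
      have h2 := List.contains_iff_mem.mpr hvF1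
      rw [h2] at hc
      exact absurd hc (by decide)
    · rintro ⟨hk, hd⟩
      refine ⟨hk, ?_⟩
      have hvF1 : v ∉ F1 := fun hm => hd ((hF1mem v).mp hm).1
      rw [hd1contains v]
      cases h : F1.contains v with
      | false => rfl
      | true => exact absurd (List.contains_iff_mem.mp h) hvF1
  -- the composite-key sort produces exactly A's concatenation
  have hFTnd : (F1 ++ T).Nodup := by
    refine List.Nodup.append hF1nd (hsortnd.filter _) ?_
    intro a haF haT
    exact ((hTmem a).mp haT).2 ((hF1mem a).mp haF).1
  have hperm : (F1 ++ T).Perm counts.keys := by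
    rw [List.perm_ext_iff_of_nodup hFTnd hKnd]
    intro a
    rw [List.mem_append, hF1mem a, hTmem a]
    by_cases hd : a ∈ pvDisplayOrder <;> simp [hd]
  have hpair : List.Pairwise (fun a b => pvSortKey a < pvSortKey b) (F1 ++ T) := by
    rw [List.pairwise_append]
    refine ⟨List.Pairwise.sublist List.filter_sublist pvSortKey_pairwise_display, ?_, ?_⟩
    · have hle : List.Pairwise (· ≤ ·) (PySem.List.sorted counts.keys id) :=
        PySem.List.sorted_pairwise counts.keys id
      have hlt : List.Pairwise (· < ·) (PySem.List.sorted counts.keys id) :=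
        (hle.and hsortnd).imp (fun h => lt_of_le_of_ne h.1 h.2)
      refine (hlt.filter _).imp_of_mem (fun {a b} haT hbT hab => ?_)
      have ha5 : pvRank.getD a 5 = 5 := pvRank_getD_of_not_mem a ((hTmem a).mp haT).2
      have hb5 : pvRank.getD b 5 = 5 := pvRank_getD_of_not_mem b ((hTmem b).mp hbT).2
      rw [pvSortKey_eq, pvSortKey_eq]
      exact Prod.Lex.lt_iff.mpr (Or.inr ⟨by simp [ha5, hb5], by simpa using hab⟩)
    · intro a haF b hbT
      have ha : pvRank.getD a 5 < 5 := pvRank_getD_of_mem a ((hF1mem a).mp haF).1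
      have hb : pvRank.getD b 5 = 5 := pvRank_getD_of_not_mem b ((hTmem b).mp hbT).2
      rw [pvSortKey_eq, pvSortKey_eq]
      exact Prod.Lex.lt_iff.mpr (Or.inl (by simp [hb]; exact ha))
  have hsorted : PySem.List.sorted counts.keys pvSortKey = F1 ++ T :=
    PySem.List.sorted_eq_of_perm_of_pairwise_lt counts.keys (F1 ++ T) pvSortKey hperm hpair
  -- B's dict build maps the sorted keys to their counts
  have hBnd : (PySem.List.sorted counts.keys pvSortKey).Nodup :=
    ((PySem.List.sorted_perm counts.keys pvSortKey false).nodup_iff).mpr hKnd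
  have hB : ((PySem.List.sorted counts.keys pvSortKey).foldl
      (fun d v => d.insert v (counts.getD v 0)) PySem.Dict.empty).items
      = (PySem.List.sorted counts.keys pvSortKey).map f := by
    have h := PySem.Dict.items_foldl_insert_fresh (PySem.List.sorted counts.keys pvSortKey) id
      (fun v => counts.getD v 0) PySem.Dict.empty (fun a _ => PySem.Dict.contains_empty a)
      (by simpa using hBnd)
    simpa [hf] using h
  rw [hB, hsorted, List.map_append, hd1items]

-- ===== VERDICT (by name: the statement is the Claim_ definition above) =====
theorem prior_variant_distribution_spec : Claim_equal_prior_variant_distribution := by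
  intro items _
  unfold Spec_prior_variant_distribution
  exact pv_main_eq items
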